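-- pv_equiv track=rewrite | github.com/niebak/MOcode_testing | code_functions.py | marker_to_segment
-- ===== SOURCE A (Python) =====
-- def marker_to_segment(Marker_List,segment_marker=-1,initial_segment=0):
--     '''
--     Takes a marker-list and creates a segmentlist.
--     '''
--     segmentlist=Marker_List
--     segmentname=initial_segment
--     for i in range(0,len(Marker_List)):
--         curr=Marker_List[i]
--         if(curr==segment_marker):
--             segmentname=segmentname+1
--         segmentlist[i]=segmentname
--     return segmentlist
-- ===== SOURCE B (Python) =====
-- def marker_to_segment(Marker_List, segment_marker=-1, initial_segment=0):
--     '''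
--     Takes a marker-list and creates a segmentlist.
--     Chunk-based version: repeatedly locate the next marker, emit a whole
--     constant run for the chunk before it (plus the marker cell), and move on.
--     '''
--     out = []
--     rest = Marker_List
--     name = initial_segment
--     while segment_marker in rest:
--         j = rest.index(segment_marker)
--         out += [name] * j + [name + 1]
--         rest = rest[j + 1:]
--         name += 1
--     out += [name] * len(rest)
--     Marker_List[:] = out
--     return Marker_List
-- ===== Notes on version B (the rewrite author's own statement) =====
-- stated objective: alternative
-- what changed: Replaces A's element-wise scan with a running name by a chunk-based construction: repeatedly find the next marker with index(), emit a whole constant run by list repetition for the chunk up to and including it, and recurse on the remaining suffix.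
import Mathlib
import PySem

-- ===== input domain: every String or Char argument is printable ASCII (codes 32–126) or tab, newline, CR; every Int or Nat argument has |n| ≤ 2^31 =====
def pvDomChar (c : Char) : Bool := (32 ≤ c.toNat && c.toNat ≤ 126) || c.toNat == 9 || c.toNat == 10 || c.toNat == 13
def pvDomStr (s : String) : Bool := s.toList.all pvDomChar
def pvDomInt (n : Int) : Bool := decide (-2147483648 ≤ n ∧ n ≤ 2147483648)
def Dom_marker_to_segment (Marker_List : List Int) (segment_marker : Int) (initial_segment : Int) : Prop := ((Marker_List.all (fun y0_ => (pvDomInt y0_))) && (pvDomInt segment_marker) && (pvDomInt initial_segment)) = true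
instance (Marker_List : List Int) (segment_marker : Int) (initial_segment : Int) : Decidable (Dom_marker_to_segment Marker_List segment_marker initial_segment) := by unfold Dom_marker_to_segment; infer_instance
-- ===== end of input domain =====

-- B replaces A's element-wise scan by a chunk-based construction (find next marker with
-- index, emit whole constant runs); 'alternative', same cost. Both Pythons mutate
-- Marker_List in place; the equivalence proved here is about the return value.

-- ===== PORT A =====
-- A's loop: for i in range(len(L)): read L[i] from the (mutated) list, bump the name on a marker, write L[i].
def marker_to_segment (Marker_List : List Int) (segment_marker : Int) (initial_segment : Int) : List Int :=
  ((PySem.List.pyRange 0 (Marker_List.length : Int) 1).foldl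
    (fun (st : List Int × Int) i =>
      let curr := (PySem.List.pyGet? st.1 i).getD 0   -- i is always in range, so never the default
      let name := if curr = segment_marker then st.2 + 1 else st.2
      (PySem.List.pySetD st.1 i name, name))
    (Marker_List, initial_segment)).1

-- ===== PORT B =====
-- B's while loop: while marker in rest: j = rest.index(marker); out += [name]*j + [name+1];
-- rest = rest[j+1:]; name += 1.  The 'marker in rest' test and rest.index are fused as a
-- match on PySem.List.index? (some j ↔ membership, exactly Python's first-occurrence index).
def mtsChunks (sm : Int) (rest : List Int) (name : Int) (out : List Int) : List Int :=
  match h : PySem.List.index? rest sm with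
  | some j => mtsChunks sm (rest.drop (j + 1)) (name + 1) (out ++ List.replicate j name ++ [name + 1])
  | none => out ++ List.replicate rest.length name
termination_by rest.length
decreasing_by
  obtain ⟨hk, _, _⟩ := PySem.List.getElem_of_index?_eq_some h
  simp only [List.length_drop]; omega

def marker_to_segment_alt (Marker_List : List Int) (segment_marker : Int) (initial_segment : Int) : List Int :=
  mtsChunks segment_marker Marker_List initial_segment []

-- ===== PRECONDITION & SPEC =====
def Spec_marker_to_segment (Marker_List : List Int) (segment_marker : Int) (initial_segment : Int) (out : List Int) : Prop := out = marker_to_segment_alt Marker_List segment_marker initial_segment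
instance (Marker_List : List Int) (segment_marker : Int) (initial_segment : Int) (out : List Int) : Decidable (Spec_marker_to_segment Marker_List segment_marker initial_segment out) := by unfold Spec_marker_to_segment; infer_instance

-- ===== CLAIM (what is proved, stated in full; the proofs are below) =====
def Claim_equal_marker_to_segment : Prop := ∀ (Marker_List : List Int) (segment_marker : Int) (initial_segment : Int), Dom_marker_to_segment Marker_List segment_marker initial_segment → Spec_marker_to_segment Marker_List segment_marker initial_segment (marker_to_segment Marker_List segment_marker initial_segment)

-- ===== LEMMAS AND PROOFS =====

-- the common value both programs compute: the list of running segment names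
def segSpec (sm : Int) : List Int → Int → List Int
  | [], _ => []
  | x :: xs, n => (if x = sm then n + 1 else n) :: segSpec sm xs (if x = sm then n + 1 else n)

lemma segSpec_no_marker (sm : Int) : ∀ (l : List Int), sm ∉ l → ∀ n, segSpec sm l n = List.replicate l.length n := by
  intro l
  induction l with
  | nil => intro _ n; simp [segSpec]
  | cons x xs ih =>
    intro h n
    have hx : x ≠ sm := fun e => h (by simp [e])
    simp [segSpec, hx, ih (fun m => h (List.mem_cons_of_mem _ m)), List.replicate_succ]

lemma segSpec_split (sm : Int) : ∀ (pre : List Int), sm ∉ pre → ∀ (suf : List Int) (n : Int),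
    segSpec sm (pre ++ sm :: suf) n = List.replicate pre.length n ++ (n + 1) :: segSpec sm suf (n + 1) := by
  intro pre
  induction pre with
  | nil => intro _ suf n; simp [segSpec]
  | cons x xs ih =>
    intro h suf n
    have hx : x ≠ sm := fun e => h (by simp [e])
    simp [segSpec, hx, ih (fun m => h (List.mem_cons_of_mem _ m)) suf n, List.replicate_succ]

lemma mtsChunks_eq (sm : Int) : ∀ (rest : List Int) (n : Int) (out : List Int),
    mtsChunks sm rest n out = out ++ segSpec sm rest n := by
  intro rest
  induction hlen : rest.length using Nat.strong_induction_on generalizing rest with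
  | _ len ih =>
    subst hlen
    intro n out
    rw [mtsChunks]
    split
    next j hidx =>
      obtain ⟨pre, suf, hrest, hlen, hmem⟩ := (PySem.List.index?_eq_some_iff rest sm j).mp hidx
      have hdrop : rest.drop (j + 1) = suf := by
        subst hrest; subst hlen
        rw [show pre.length + 1 = (pre ++ [sm]).length by simp,
            show pre ++ sm :: suf = (pre ++ [sm]) ++ suf by simp, List.drop_left]
      have hsub : (rest.drop (j + 1)).length < rest.length := by
        rw [hdrop]; subst hrest; subst hlen; simp; omega
      rw [ih _ hsub _ rfl (n + 1) (out ++ List.replicate j n ++ [n + 1])]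
      rw [hdrop, hrest, segSpec_split sm pre hmem suf n, hlen]
      simp
    next hidx =>
      have : sm ∉ rest := (PySem.List.index?_eq_none_iff rest sm).mp hidx
      rw [segSpec_no_marker sm rest this n]

lemma set_append_cons (done : List Int) (x m : Int) (xs : List Int) :
    (done ++ x :: xs).set done.length m = done ++ m :: xs := by
  induction done with
  | nil => simp
  | cons d ds ih => simp [ih]

lemma lemA (sm : Int) : ∀ (rest done : List Int) (name : Int),
    ((PySem.List.pyRange (done.length : Int) ((done.length : Int) + (rest.length : Int)) 1).foldl
      (fun (st : List Int × Int) i =>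
        let curr := (PySem.List.pyGet? st.1 i).getD 0
        let nm := if curr = sm then st.2 + 1 else st.2
        (PySem.List.pySetD st.1 i nm, nm))
      (done ++ rest, name)).1
    = done ++ segSpec sm rest name := by
  intro rest
  induction rest with
  | nil =>
    intro done name
    rw [PySem.List.pyRange_one_eq_nil (by simp)]
    simp [segSpec]
  | cons x xs ih =>
    intro done name
    rw [PySem.List.pyRange_one_cons (by push_cast [List.length_cons]; omega)]
    simp only [List.foldl_cons]
    have hget : PySem.List.pyGet? (done ++ x :: xs) (done.length : Int) = some x :=
      PySem.List.pyGet?_append_length done xs x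
    have hset : ∀ m : Int, PySem.List.pySetD (done ++ x :: xs) (done.length : Int) m = done ++ m :: xs := by
      intro m
      rw [PySem.List.pySetD_natCast, set_append_cons]
    simp only [hget, Option.getD_some, hset]
    have := ih (done ++ [if x = sm then name + 1 else name]) (if x = sm then name + 1 else name)
    have harith : ((done ++ [if x = sm then name + 1 else name]).length : Int) = (done.length : Int) + 1 := by
      simp
    rw [harith] at this
    have harith2 : ((done.length : Int) + 1 + (xs.length : Int)) = (done.length : Int) + ((x :: xs).length : Int) := by
      simp; omega
    rw [harith2] at this
    simp only [List.append_assoc, List.cons_append, List.nil_append] at this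
    simpa [segSpec] using this

-- ===== VERDICT (by name: the statement is the Claim_ definition above) =====
theorem marker_to_segment_spec : Claim_equal_marker_to_segment := by
  intro ml sm init _
  show marker_to_segment ml sm init = marker_to_segment_alt ml sm init
  have hA := lemA sm ml [] init
  simp only [List.length_nil, Int.natCast_zero, List.nil_append, zero_add] at hA
  unfold marker_to_segment marker_to_segment_alt
  rw [hA, mtsChunks_eq]
  simp
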